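-- pv_equiv track=rewrite | github.com/GitMonsters/octotetrahedral-agi | arc-puzzle-catalog/re-arc/solves/61ab732d/solver.py | transform
-- ===== SOURCE A (Python) =====
-- def transform(input_grid):
--     from collections import Counter
--
--     grid = [row[:] for row in input_grid]
--     H = len(grid)
--     W = len(grid[0])
--
--     # Find background color (most common)
--     flat = [c for row in grid for c in row]
--     bg = Counter(flat).most_common(1)[0][0]
--
--     # Find all non-background pixels and track which columns have pixels
--     pixels = []
--     pixel_cols = set()
--     for r in range(H):
--         for c in range(W):
--             if grid[r][c] != bg:
--                 pixels.append((r, c, grid[r][c]))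
--                 pixel_cols.add(c)
--
--     output = [row[:] for row in input_grid]
--
--     # Each pixel creates a downward trail alternating between its color and 6
--     for (pr, pc, pv) in pixels:
--         for r in range(pr + 1, H):
--             dist = r - pr
--             val = 6 if dist % 2 == 1 else pv
--             output[r][pc] = val
--
--     # Pixel at second-to-last row with both adjacent columns free:
--     # creates an upward trail of 6 at col+1, every other row
--     for (pr, pc, pv) in pixels:
--         if pr == H - 2:
--             col_left_free = pc - 1 >= 0 and (pc - 1) not in pixel_cols
--             col_right_free = pc + 1 < W and (pc + 1) not in pixel_cols
--             if col_left_free and col_right_free: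
--                 for r in range(pr, -1, -2):
--                     if output[r][pc + 1] == bg:
--                         output[r][pc + 1] = 6
--
--     return output
-- ===== SOURCE B (Python) =====
-- def transform(input_grid):
--     from collections import Counter
--
--     H = len(input_grid)
--     W = len(input_grid[0])
--
--     # Background color (most common)
--     flat = [c for row in input_grid for c in row]
--     bg = Counter(flat).most_common(1)[0][0]
--
--     output = [row[:] for row in input_grid]
--
--     # One downward pass per column: the trail value at a cell is determined by
--     # the NEAREST non-background pixel above it (the last writer in A's order).
--     for c in range(W):
--         last = None  # (row, value) of nearest pixel above the current row
--         for r in range(H):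
--             if last is not None:
--                 pr, pv = last
--                 output[r][c] = 6 if (r - pr) % 2 == 1 else pv
--             v = input_grid[r][c]
--             if v != bg:
--                 last = (r, v)
--
--     # Upward trails: a pixel at row H-2 whose two adjacent columns contain no
--     # pixel at all paints 6 at column pc+1 on rows H-2, H-4, ...  (such a
--     # column is entirely background, so no emptiness check per cell is needed)
--     if H >= 2:
--         colfree = [all(input_grid[r][c] == bg for r in range(H)) for c in range(W)]
--         for pc in range(W):
--             if (input_grid[H - 2][pc] != bg and pc - 1 >= 0 and pc + 1 < W
--                     and colfree[pc - 1] and colfree[pc + 1]):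
--                 r = H - 2
--                 while r >= 0:
--                     output[r][pc + 1] = 6
--                     r -= 2
--
--     return output
-- ===== Notes on version B (the rewrite author's own statement) =====
-- stated objective: faster
-- what changed: A repaints a whole column trail below every non-background pixel (and re-checks set membership per pixel); B makes one downward sweep per column tracking the nearest pixel above each cell, plus a precomputed column-freeness table for the upward trails.
import Mathlib
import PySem

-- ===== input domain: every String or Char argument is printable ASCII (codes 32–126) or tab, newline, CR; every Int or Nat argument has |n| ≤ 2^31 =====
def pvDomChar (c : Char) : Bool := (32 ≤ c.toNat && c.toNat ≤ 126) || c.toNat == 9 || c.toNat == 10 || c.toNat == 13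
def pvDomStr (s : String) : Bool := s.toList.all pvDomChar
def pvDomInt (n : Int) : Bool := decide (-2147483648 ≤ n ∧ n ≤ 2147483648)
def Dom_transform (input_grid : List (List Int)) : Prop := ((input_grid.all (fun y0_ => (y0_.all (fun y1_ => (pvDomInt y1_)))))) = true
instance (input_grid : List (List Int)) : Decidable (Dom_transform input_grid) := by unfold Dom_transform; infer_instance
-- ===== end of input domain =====

-- B replaces A's per-pixel trail loops (each pixel repaints its whole column below)
-- by one downward pass per column tracking the nearest pixel above: objective 'faster'.

-- shared low-level grid helpers (both Pythons read/write cells the same way)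
def get2 (g : List (List Int)) (r c : Nat) : Int := (g.getD r []).getD c 0
def set2 (g : List (List Int)) (r c : Nat) (v : Int) : List (List Int) :=
  g.set r ((g.getD r []).set c v)
-- Counter(flat).most_common(1)[0][0]: first key (insertion order) with maximal count
def pvMostCommon (flat : List Int) : Int :=
  match PySem.List.max? (PySem.Dict.counter flat).items (fun p => p.2) with
  | some p => p.1
  | none => 0

-- ===== PORT A =====
def pvScanPixels (g : List (List Int)) (bg : Int) (H W : Nat) :
    List (Nat × Nat × Int) × PySem.Set Nat :=
  (List.range H).foldl (fun st r =>
    (List.range W).foldl (fun (st : List (Nat × Nat × Int) × PySem.Set Nat) c =>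
      if get2 g r c ≠ bg then (st.1 ++ [(r, c, get2 g r c)], PySem.Set.add st.2 c) else st)
      st)
    ([], PySem.Set.empty)

def pvTrailA (H : Nat) (out : List (List Int)) (p : Nat × Nat × Int) : List (List Int) :=
  (List.range' (p.1 + 1) (H - (p.1 + 1))).foldl
    (fun out r => set2 out r p.2.1 (if (r - p.1) % 2 == 1 then 6 else p.2.2)) out

def pvDownTo0 (n : Nat) : List Nat :=
  n :: (if h : 2 ≤ n then pvDownTo0 (n - 2) else [])
decreasing_by omega

def pvUpTrailA (bg : Int) (pcols : PySem.Set Nat) (H W : Nat)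
    (out : List (List Int)) (p : Nat × Nat × Int) : List (List Int) :=
  if p.1 + 2 = H then
    if (1 ≤ p.2.1 ∧ ¬ (PySem.Set.contains pcols (p.2.1 - 1) = true)) ∧
       (p.2.1 + 1 < W ∧ ¬ (PySem.Set.contains pcols (p.2.1 + 1) = true)) then
      (pvDownTo0 p.1).foldl (fun out r =>
        if get2 out r (p.2.1 + 1) = bg then set2 out r (p.2.1 + 1) 6 else out) out
    else out
  else out

def transform (input_grid : List (List Int)) : List (List Int) :=
  let H := input_grid.length
  let W := (input_grid.headD []).length
  let bg := pvMostCommon (input_grid.flatMap (fun row => row))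
  let ps := pvScanPixels input_grid bg H W
  let output := ps.1.foldl (pvTrailA H) input_grid
  ps.1.foldl (pvUpTrailA bg ps.2 H W) output

-- ===== PORT B =====
def pvColPass (g : List (List Int)) (bg : Int) (H : Nat)
    (out : List (List Int)) (c : Nat) : List (List Int) :=
  ((List.range H).foldl (fun (st : List (List Int) × Option (Nat × Int)) r =>
      let out1 := match st.2 with
        | some (pr, pv) => set2 st.1 r c (if (r - pr) % 2 == 1 then 6 else pv)
        | none => st.1
      (out1, if get2 g r c ≠ bg then some (r, get2 g r c) else st.2))
    (out, none)).1

def transform_alt (input_grid : List (List Int)) : List (List Int) :=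
  let H := input_grid.length
  let W := (input_grid.headD []).length
  let bg := pvMostCommon (input_grid.flatMap (fun row => row))
  let output := (List.range W).foldl (pvColPass input_grid bg H) input_grid
  if 2 ≤ H then
    let colfree := (List.range W).map (fun c =>
      (List.range H).all (fun r => get2 input_grid r c == bg))
    (List.range W).foldl (fun out pc =>
      if get2 input_grid (H - 2) pc ≠ bg ∧ 1 ≤ pc ∧ pc + 1 < W ∧
         colfree.getD (pc - 1) false = true ∧ colfree.getD (pc + 1) false = true then
        (pvDownTo0 (H - 2)).foldl (fun out r => set2 out r (pc + 1) 6) out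
      else out) output
  else output

-- ===== PRECONDITION & SPEC =====
-- Pre_ = exactly where Python A returns: a nonempty grid with at least one cell,
-- every row at least as long as the first (shorter rows or an all-empty grid make A raise IndexError).
def Pre_transform (input_grid : List (List Int)) : Prop :=
  input_grid ≠ [] ∧ input_grid.flatMap (fun row => row) ≠ [] ∧
  ∀ row ∈ input_grid, (input_grid.headD []).length ≤ row.length
instance (input_grid : List (List Int)) : Decidable (Pre_transform input_grid) := by
  unfold Pre_transform; infer_instance
def pvWitness_transform : List (List Int) := [[1, 1, 1], [1, 2, 1], [1, 1, 1]]

def Spec_transform (input_grid : List (List Int)) (out : List (List Int)) : Prop :=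
  out = transform_alt input_grid
instance (input_grid : List (List Int)) (out : List (List Int)) : Decidable (Spec_transform input_grid out) := by unfold Spec_transform; infer_instance

-- ===== CLAIM (what is proved, stated in full; the proofs are below) =====
def Claim_equal_transform : Prop := ∀ (input_grid : List (List Int)), Dom_transform input_grid → Pre_transform input_grid → Spec_transform input_grid (transform input_grid)

-- ===== LEMMAS AND PROOFS =====

-- basic cell lemmas
theorem length_set2 (g : List (List Int)) (r c : Nat) (v : Int) :
    (set2 g r c v).length = g.length := by
  simp [set2]

theorem rowlen_set2 (g : List (List Int)) (r c : Nat) (v : Int) (i : Nat) :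
    ((set2 g r c v).getD i []).length = (g.getD i []).length := by
  simp only [set2, List.getD_eq_getElem?_getD]
  rcases eq_or_ne i r with rfl | hi
  · rcases Nat.lt_or_ge i g.length with h | h
    · simp [List.getElem?_set_self, h, List.getD_eq_getElem?_getD, List.getElem?_eq_getElem h]
    · simp [List.set_eq_of_length_le h]
  · simp [List.getElem?_set_ne (Ne.symm hi)]

theorem get2_set2 (g : List (List Int)) (r c : Nat) (v : Int) (r' c' : Nat) :
    get2 (set2 g r c v) r' c' =
      if r' = r ∧ c' = c ∧ r < g.length ∧ c < (g.getD r []).length then v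
      else get2 g r' c' := by
  simp only [get2, set2, List.getD_eq_getElem?_getD]
  rcases eq_or_ne r' r with rfl | hr
  · rcases Nat.lt_or_ge r' g.length with h | h
    · simp only [List.getElem?_set_self h, Option.getD_some]
      rcases eq_or_ne c' c with rfl | hc
      · rcases Nat.lt_or_ge c' (g.getD r' []).length with h2 | h2
        · rw [List.getD_eq_getElem?_getD] at h2
          simp [h2, Nat.not_le.mpr h]
        · rw [List.getD_eq_getElem?_getD] at h2
          simp [Nat.not_lt.mpr h2, List.set_eq_of_length_le h2]
      · simp [hc, List.getElem?_set_ne (Ne.symm hc)]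
    · simp [List.set_eq_of_length_le h, Nat.not_lt.mpr h]
  · simp [List.getElem?_set_ne (Ne.symm hr), hr]

-- write lists
def applyWrites (g : List (List Int)) (ws : List (Nat × Nat × Int)) : List (List Int) :=
  ws.foldl (fun g w => set2 g w.1 w.2.1 w.2.2) g

theorem applyWrites_cons (g : List (List Int)) (w : Nat × Nat × Int) (ws : List (Nat × Nat × Int)) :
    applyWrites g (w :: ws) = applyWrites (set2 g w.1 w.2.1 w.2.2) ws := rfl

theorem applyWrites_append (g : List (List Int)) (l1 l2 : List (Nat × Nat × Int)) :
    applyWrites g (l1 ++ l2) = applyWrites (applyWrites g l1) l2 := by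
  simp [applyWrites, List.foldl_append]

theorem length_applyWrites (g : List (List Int)) (ws : List (Nat × Nat × Int)) :
    (applyWrites g ws).length = g.length := by
  induction ws generalizing g with
  | nil => rfl
  | cons w ws ih => rw [applyWrites_cons, ih, length_set2]

theorem rowlen_applyWrites (g : List (List Int)) (ws : List (Nat × Nat × Int)) (i : Nat) :
    ((applyWrites g ws).getD i []).length = (g.getD i []).length := by
  induction ws generalizing g with
  | nil => rfl
  | cons w ws ih => rw [applyWrites_cons, ih, rowlen_set2]

-- "overwrite" folds: the last hit wins
def pvOW {α β : Type} (f : α → Option β) (l : List α) (o : Option β) : Option β :=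
  l.foldl (fun acc a => match f a with | some b => some b | none => acc) o

theorem pvOW_cons {α β : Type} (f : α → Option β) (a : α) (l : List α) (o : Option β) :
    pvOW f (a :: l) o = pvOW f l (match f a with | some b => some b | none => o) := by
  cases h : f a <;> simp [pvOW, h]

theorem pvOW_eq_getLast?_filterMap {α β : Type} (f : α → Option β) (l : List α) (o : Option β) :
    pvOW f l o = match (l.filterMap f).getLast? with
                 | some b => some b | none => o := by
  induction l generalizing o with
  | nil => simp [pvOW]
  | cons a l ih =>
      rw [pvOW_cons, ih]
      cases h : f a with
      | none => simp [List.filterMap_cons, h]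
      | some b =>
        simp only [List.filterMap_cons, h, List.getLast?_cons]
        cases h2 : (l.filterMap f).getLast? <;> simp [h2]

def lastMatch (ws : List (Nat × Nat × Int)) (r c : Nat) : Option Int :=
  pvOW (fun w => if w.1 = r ∧ w.2.1 = c then some w.2.2 else none) ws none

theorem get2_applyWrites (g : List (List Int)) (ws : List (Nat × Nat × Int))
    (hws : ∀ w ∈ ws, w.1 < g.length ∧ w.2.1 < ((g.getD w.1 []).length)) (r c : Nat) :
    get2 (applyWrites g ws) r c = (lastMatch ws r c).getD (get2 g r c) := by
  induction ws generalizing g with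
  | nil => simp [applyWrites, lastMatch, pvOW]
  | cons w ws ih =>
      have hw := hws w (by simp)
      have hws' : ∀ x ∈ ws, x.1 < (set2 g w.1 w.2.1 w.2.2).length ∧
          x.2.1 < (((set2 g w.1 w.2.1 w.2.2).getD x.1 []).length) := by
        intro x hx
        rw [length_set2, rowlen_set2]
        exact hws x (by simp [hx])
      rw [applyWrites_cons, ih _ hws']
      have hlm : lastMatch (w :: ws) r c =
          match lastMatch ws r c with
          | some x => some x
          | none => if w.1 = r ∧ w.2.1 = c then some w.2.2 else none := by
        unfold lastMatch
        rw [pvOW_cons, pvOW_eq_getLast?_filterMap, pvOW_eq_getLast?_filterMap]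
        cases h2 : (ws.filterMap _).getLast? <;>
          cases h3 : (if w.1 = r ∧ w.2.1 = c then some w.2.2 else (none : Option Int)) <;>
            simp_all
      rw [hlm]
      cases h2 : lastMatch ws r c with
      | some x => simp
      | none =>
          simp only []
          by_cases hm : w.1 = r ∧ w.2.1 = c
          · obtain ⟨h1', h2'⟩ := hm
            subst h1'; subst h2'
            rw [if_pos ⟨rfl, rfl⟩, get2_set2, if_pos ⟨rfl, rfl, hw.1, hw.2⟩]
            simp
          · rw [if_neg hm]
            rw [get2_set2]
            have : ¬ (r = w.1 ∧ c = w.2.1 ∧ w.1 < g.length ∧ w.2.1 < (g.getD w.1 []).length) := by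
              intro ⟨a1, a2, _⟩; exact hm ⟨a1.symm, a2.symm⟩
            simp [this]
            intro a1 a2 _ _
            exact absurd ⟨a1.symm, a2.symm⟩ hm

theorem get2_applyWrites_colne (g : List (List Int)) (ws : List (Nat × Nat × Int)) (d : Nat)
    (h : ∀ w ∈ ws, w.2.1 ≠ d) (r : Nat) :
    get2 (applyWrites g ws) r d = get2 g r d := by
  induction ws generalizing g with
  | nil => rfl
  | cons w ws ih =>
      rw [applyWrites_cons, ih _ (fun x hx => h x (by simp [hx])), get2_set2]
      have : ¬ (r = w.1 ∧ d = w.2.1 ∧ w.1 < g.length ∧ w.2.1 < (g.getD w.1 []).length) := by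
        intro ⟨_, a2, _⟩; exact h w (by simp) a2.symm
      simp only [this, if_false]

-- range' lemmas: at most one index matches
theorem filterMap_range'_singleO {β : Type} (r : Nat) (v : Nat → Option β) :
    ∀ (n s : Nat), (List.range' s n).filterMap (fun x => if x = r then v x else none) =
      if s ≤ r ∧ r < s + n then (v r).toList else [] := by
  intro n
  induction n with
  | zero =>
      intro s
      have h0 : ¬ (s ≤ r ∧ r < s + 0) := by omega
      simp [h0]
  | succ n ih =>
      intro s
      rw [List.range'_succ, List.filterMap_cons, ih (s + 1)]
      by_cases hs : s = r
      · subst hs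
        have h1 : ¬ (s + 1 ≤ s ∧ s < s + 1 + n) := by omega
        have h2 : s ≤ s ∧ s < s + (n + 1) := by omega
        cases hv : v s <;> simp [h1, h2, hv]
      · rw [if_neg hs]
        by_cases h2 : s + 1 ≤ r ∧ r < s + 1 + n
        · rw [if_pos h2, if_pos (by omega)]
        · rw [if_neg h2, if_neg (by omega)]

theorem filterMap_range'_single {β : Type} (r : Nat) (v : Nat → β) (n s : Nat) :
    (List.range' s n).filterMap (fun x => if x = r then some (v x) else none) =
      if s ≤ r ∧ r < s + n then [v r] else [] := by
  rw [filterMap_range'_singleO r (fun x => some (v x)) n s]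
  split <;> rfl

theorem flatMap_range'_single {β : Type} (r : Nat) (v : Nat → List β) :
    ∀ (n s : Nat), (List.range' s n).flatMap (fun x => if x = r then v x else []) =
      if s ≤ r ∧ r < s + n then v r else [] := by
  intro n
  induction n with
  | zero =>
      intro s
      have h0 : ¬ (s ≤ r ∧ r < s + 0) := by omega
      simp [h0]
  | succ n ih =>
      intro s
      rw [List.range'_succ, List.flatMap_cons, ih (s + 1)]
      by_cases hs : s = r
      · subst hs
        have h1 : ¬ (s + 1 ≤ s ∧ s < s + 1 + n) := by omega
        have h2 : s ≤ s ∧ s < s + (n + 1) := by omega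
        simp [h1, h2]
      · rw [if_neg hs]
        by_cases h2 : s + 1 ≤ r ∧ r < s + 1 + n
        · rw [if_pos h2, if_pos (by omega)]; simp
        · rw [if_neg h2, if_neg (by omega)]; simp

theorem flatMap_ite_singleton {α β : Type} (l : List α) (P : α → Prop) [DecidablePred P] (h : α → β) :
    l.flatMap (fun x => if P x then [h x] else []) =
      l.filterMap (fun x => if P x then some (h x) else none) := by
  induction l with
  | nil => rfl
  | cons a l ih => by_cases hp : P a <;> simp [hp, ih]

-- proof-side descriptions of the two programs
def pixRow (g : List (List Int)) (bg : Int) (W r : Nat) : List Nat :=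
  (List.range W).filter (fun c => decide (get2 g r c ≠ bg))

def pixelsOf (g : List (List Int)) (bg : Int) (H W : Nat) : List (Nat × Nat × Int) :=
  (List.range H).flatMap (fun r => (pixRow g bg W r).map (fun c => (r, c, get2 g r c)))

def writesA (H : Nat) (p : Nat × Nat × Int) : List (Nat × Nat × Int) :=
  (List.range' (p.1 + 1) (H - (p.1 + 1))).map
    (fun r => (r, p.2.1, if (r - p.1) % 2 == 1 then (6 : Int) else p.2.2))

def nearAbove (g : List (List Int)) (bg : Int) (c r : Nat) : Option (Nat × Int) :=
  ((List.range r).filterMap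
    (fun pr => if get2 g pr c ≠ bg then some (pr, get2 g pr c) else none)).getLast?

def tv (r : Nat) (x : Nat × Int) : Int := if (r - x.1) % 2 == 1 then 6 else x.2

def val1 (g : List (List Int)) (bg : Int) (r c : Nat) : Int :=
  match nearAbove g bg c r with
  | some x => tv r x
  | none => get2 g r c

def bWrites (g : List (List Int)) (bg : Int) (H c : Nat) : List (Nat × Nat × Int) :=
  (List.range H).filterMap (fun r => (nearAbove g bg c r).map (fun x => (r, c, tv r x)))

def RectGE (g : List (List Int)) (W : Nat) : Prop :=
  ∀ i, i < g.length → W ≤ ((g.getD i []).length)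

def SameShape (out g : List (List Int)) : Prop :=
  out.length = g.length ∧ ∀ i, ((out.getD i []).length) = ((g.getD i []).length)

theorem sameShape_applyWrites (out g : List (List Int)) (ws : List (Nat × Nat × Int))
    (h : SameShape out g) : SameShape (applyWrites out ws) g := by
  exact ⟨by rw [length_applyWrites, h.1], fun i => by rw [rowlen_applyWrites, h.2]⟩

-- the scan loop of A produces exactly the row-major pixel list and the set of pixel columns
theorem auxcol (g : List (List Int)) (bg : Int) (r : Nat) (cols : List Nat)
    (st : List (Nat × Nat × Int) × PySem.Set Nat) :
    cols.foldl (fun (st : List (Nat × Nat × Int) × PySem.Set Nat) c =>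
      if get2 g r c ≠ bg then (st.1 ++ [(r, c, get2 g r c)], PySem.Set.add st.2 c) else st) st =
    (st.1 ++ (cols.filter (fun c => decide (get2 g r c ≠ bg))).map (fun c => (r, c, get2 g r c)),
     PySem.Set.update st.2 (cols.filter (fun c => decide (get2 g r c ≠ bg)))) := by
  induction cols generalizing st with
  | nil => simp [PySem.Set.update]
  | cons c cols ih =>
      rw [List.foldl_cons, List.filter_cons]
      by_cases h : get2 g r c ≠ bg
      · rw [if_pos h, ih]
        simp [h, PySem.Set.update]
      · rw [if_neg h, ih]
        simp [h]

theorem scanPixels_spec (g : List (List Int)) (bg : Int) (H W : Nat) :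
    pvScanPixels g bg H W =
      (pixelsOf g bg H W, PySem.Set.ofList ((List.range H).flatMap (pixRow g bg W))) := by
  rw [pvScanPixels, pixelsOf]
  have : ∀ (rows : List Nat) (st : List (Nat × Nat × Int) × PySem.Set Nat),
      rows.foldl (fun st r =>
        (List.range W).foldl (fun (st : List (Nat × Nat × Int) × PySem.Set Nat) c =>
          if get2 g r c ≠ bg then (st.1 ++ [(r, c, get2 g r c)], PySem.Set.add st.2 c) else st) st) st =
      (st.1 ++ rows.flatMap (fun r => (pixRow g bg W r).map (fun c => (r, c, get2 g r c))),
       PySem.Set.update st.2 (rows.flatMap (pixRow g bg W))) := by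
    intro rows
    induction rows with
    | nil => intro st; simp [PySem.Set.update]
    | cons r rows ih =>
        intro st
        rw [List.foldl_cons, auxcol, ih]
        simp [pixRow, PySem.Set.update, List.foldl_append]
  rw [this]
  simp [PySem.Set.ofList_eq_foldl, PySem.Set.update]

-- A's trail loops are a write list
theorem phase1A_rep (H : Nat) (ps : List (Nat × Nat × Int)) (out : List (List Int)) :
    ps.foldl (pvTrailA H) out = applyWrites out (ps.flatMap (writesA H)) := by
  induction ps generalizing out with
  | nil => rfl
  | cons p ps ih =>
      rw [List.foldl_cons, List.flatMap_cons, applyWrites_append, ih]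
      congr 1
      rw [pvTrailA, writesA, applyWrites, List.foldl_map]

theorem writesA_mem (H : Nat) (p w : Nat × Nat × Int) (h : w ∈ writesA H p) :
    w.1 < H ∧ w.2.1 = p.2.1 := by
  simp only [writesA, List.mem_map, List.mem_range'_1] at h
  obtain ⟨r, ⟨hr1, hr2⟩, rfl⟩ := h
  exact ⟨by omega, rfl⟩

theorem pixelsOf_mem (g : List (List Int)) (bg : Int) (H W : Nat) (p : Nat × Nat × Int) (h : p ∈ pixelsOf g bg H W) :
    p.1 < H ∧ p.2.1 < W := by
  simp only [pixelsOf, List.mem_flatMap, List.mem_map, pixRow, List.mem_filter,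
    List.mem_range] at h
  obtain ⟨r, hr, c, ⟨hc, _⟩, rfl⟩ := h
  exact ⟨hr, hc⟩

theorem flatMap_filter {α β : Type} (p : α → Bool) (f : α → List β) (l : List α) :
    (l.filter p).flatMap f = l.flatMap (fun x => if p x then f x else []) := by
  induction l with
  | nil => rfl
  | cons a l ih =>
      by_cases hp : p a <;> simp [List.filter_cons, hp, ih]

theorem lastMatch_A (g : List (List Int)) (bg : Int) (H W r c : Nat) (hr : r < H) (hc : c < W) :
    lastMatch ((pixelsOf g bg H W).flatMap (writesA H)) r c = (nearAbove g bg c r).map (tv r) := by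
  rw [lastMatch, pvOW_eq_getLast?_filterMap]
  have hpix : ∀ r0 c0, r0 < H → (writesA H (r0, c0, get2 g r0 c0)).filterMap
      (fun w => if w.1 = r ∧ w.2.1 = c then some w.2.2 else none) =
      if c0 = c ∧ r0 < r then [tv r (r0, get2 g r0 c0)] else [] := by
    intro r0 c0 hr0
    rw [writesA, List.filterMap_map]
    by_cases hcc : c0 = c
    · have he : ((fun w : Nat × Nat × Int => if w.1 = r ∧ w.2.1 = c then some w.2.2 else none) ∘
          (fun x => (x, c0, if (x - r0) % 2 == 1 then (6:Int) else get2 g r0 c0))) =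
          (fun x => if x = r then some (if (x - r0) % 2 == 1 then (6:Int) else get2 g r0 c0) else none) := by
        funext x
        by_cases hx : x = r <;> simp [hx, hcc]
      rw [he, filterMap_range'_single]
      by_cases hlt : r0 < r
      · have hcond : c0 = c ∧ r0 < r := ⟨hcc, hlt⟩
        rw [if_pos (by omega : r0 + 1 ≤ r ∧ r < r0 + 1 + (H - (r0 + 1))), if_pos hcond]
        rfl
      · have hcond : ¬ (c0 = c ∧ r0 < r) := by tauto
        rw [if_neg (by omega : ¬ (r0 + 1 ≤ r ∧ r < r0 + 1 + (H - (r0 + 1)))), if_neg hcond]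
    · rw [List.filterMap_eq_nil_iff.mpr, if_neg (by tauto)]
      intro a ha
      simp only [Function.comp]
      rw [if_neg (by rintro ⟨_, h2⟩; exact hcc h2)]
  have hrow : ∀ r0 ∈ List.range H,
      (((pixRow g bg W r0).map (fun c0 => (r0, c0, get2 g r0 c0))).flatMap (writesA H)).filterMap
        (fun w => if w.1 = r ∧ w.2.1 = c then some w.2.2 else none) =
      if get2 g r0 c ≠ bg ∧ r0 < r then [tv r (r0, get2 g r0 c)] else [] := by
    intro r0 hr0
    rw [List.mem_range] at hr0
    rw [List.flatMap_map, List.filterMap_flatMap]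
    rw [List.flatMap_congr (fun c0 _ => hpix r0 c0 hr0)]
    rw [pixRow, flatMap_filter]
    have he2 : (fun c0 => if decide (get2 g r0 c0 ≠ bg) then
        (if c0 = c ∧ r0 < r then [tv r (r0, get2 g r0 c0)] else []) else ([] : List Int)) =
        (fun c0 => if c0 = c then
          (if get2 g r0 c ≠ bg ∧ r0 < r then [tv r (r0, get2 g r0 c)] else []) else []) := by
      funext c0
      by_cases hcc : c0 = c
      · subst hcc
        by_cases h1 : get2 g r0 c0 ≠ bg <;> by_cases h2 : r0 < r <;> simp [h1, h2]
      · by_cases h1 : get2 g r0 c0 ≠ bg <;> simp [h1, hcc]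
    rw [he2, List.range_eq_range', flatMap_range'_single]
    rw [if_pos (by omega)]
  rw [pixelsOf, List.flatMap_assoc, List.filterMap_flatMap,
      List.flatMap_congr hrow, flatMap_ite_singleton]
  have hsplit : List.range H = List.range r ++ List.range' r (H - r) := by
    rw [List.range_eq_range', List.range_eq_range']
    conv_lhs => rw [show H = r + (H - r) from by omega]
    rw [← List.range'_append]
    norm_num
  rw [hsplit, List.filterMap_append]
  have h2 : (List.range' r (H - r)).filterMap
      (fun r0 => if get2 g r0 c ≠ bg ∧ r0 < r then some (tv r (r0, get2 g r0 c)) else none) = [] := by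
    rw [List.filterMap_eq_nil_iff]
    intro a ha
    rw [List.mem_range'_1] at ha
    rw [if_neg (by rintro ⟨_, hx2⟩; omega)]
  rw [h2, List.append_nil]
  have h4 : (List.range r).filterMap
      (fun r0 => if get2 g r0 c ≠ bg ∧ r0 < r then some (tv r (r0, get2 g r0 c)) else none) =
      (List.range r).filterMap
      (fun pr => if get2 g pr c ≠ bg then some (tv r (pr, get2 g pr c)) else none) := by
    apply List.filterMap_congr
    intro x hx
    rw [List.mem_range] at hx
    by_cases h1 : get2 g x c ≠ bg
    · rw [if_pos ⟨h1, hx⟩, if_pos h1]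
    · rw [if_neg (by tauto), if_neg h1]
  rw [h4, nearAbove, ← List.getLast?_map, List.map_filterMap]
  have h5 : (fun pr => Option.map (tv r) (if get2 g pr c ≠ bg then some (pr, get2 g pr c) else none)) =
      (fun pr => if get2 g pr c ≠ bg then some (tv r (pr, get2 g pr c)) else none) := by
    funext pr
    by_cases h1 : get2 g pr c ≠ bg <;> simp [h1]
  rw [h5]
  cases hh : ((List.range r).filterMap
      (fun pr => if get2 g pr c ≠ bg then some (tv r (pr, get2 g pr c)) else none)).getLast? <;> simp


theorem nearAbove_succ (g : List (List Int)) (bg : Int) (c k : Nat) :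
    nearAbove g bg c (k + 1) =
      if get2 g k c ≠ bg then some (k, get2 g k c) else nearAbove g bg c k := by
  rw [nearAbove, List.range_succ, List.filterMap_append, List.getLast?_append]
  by_cases h : get2 g k c ≠ bg
  · simp [h, nearAbove]
  · simp [h, nearAbove]

theorem colPass_rep (g : List (List Int)) (bg : Int) (H : Nat) (out : List (List Int)) (c : Nat) :
    pvColPass g bg H out c = applyWrites out (bWrites g bg H c) := by
  rw [pvColPass]
  have main : ∀ k, (List.range k).foldl (fun (st : List (List Int) × Option (Nat × Int)) r =>
      let out1 := match st.2 with
        | some (pr, pv) => set2 st.1 r c (if (r - pr) % 2 == 1 then 6 else pv)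
        | none => st.1
      (out1, if get2 g r c ≠ bg then some (r, get2 g r c) else st.2))
      (out, none) = (applyWrites out (bWrites g bg k c), nearAbove g bg c k) := by
    intro k
    induction k with
    | zero => simp [bWrites, applyWrites, nearAbove]
    | succ k ih =>
        rw [List.range_succ, List.foldl_append, ih, List.foldl_cons, List.foldl_nil]
        have hbw : bWrites g bg (k + 1) c =
            bWrites g bg k c ++ ((nearAbove g bg c k).map (fun x => (k, c, tv k x))).toList := by
          rw [bWrites, bWrites, List.range_succ, List.filterMap_append]
          cases h : nearAbove g bg c k <;> simp [h]
        rw [hbw, applyWrites_append, nearAbove_succ]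
        cases h : nearAbove g bg c k with
        | none => simp [h, applyWrites]
        | some x => cases x with
          | mk pr pv => simp [h, applyWrites, tv, set2]
  rw [main H]

theorem bWrites_mem (g : List (List Int)) (bg : Int) (H c : Nat) (w : Nat × Nat × Int) (h : w ∈ bWrites g bg H c) :
    w.1 < H ∧ w.2.1 = c := by
  simp only [bWrites, List.mem_filterMap, List.mem_range] at h
  obtain ⟨r, hr, hmap⟩ := h
  cases hna : nearAbove g bg c r with
  | none => rw [hna] at hmap; simp at hmap
  | some x =>
      rw [hna] at hmap
      simp only [Option.map_some, Option.some_inj] at hmap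
      cases hmap
      exact ⟨hr, rfl⟩

theorem lastMatch_bWrites (g : List (List Int)) (bg : Int) (H c r : Nat) (hr : r < H) :
    lastMatch (bWrites g bg H c) r c = (nearAbove g bg c r).map (tv r) := by
  rw [lastMatch, pvOW_eq_getLast?_filterMap, bWrites, List.filterMap_filterMap]
  have he : (fun r0 => ((nearAbove g bg c r0).map (fun x => (r0, c, tv r0 x))).bind
      (fun w => if w.1 = r ∧ w.2.1 = c then some w.2.2 else none)) =
      (fun r0 => if r0 = r then (nearAbove g bg c r0).map (tv r0) else none) := by
    funext r0
    cases h : nearAbove g bg c r0 with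
    | none => simp [h]
    | some x =>
        by_cases hx : r0 = r <;> simp [h, hx]
  rw [he, List.range_eq_range', filterMap_range'_singleO]
  rw [if_pos (by omega)]
  cases h : nearAbove g bg c r <;> simp [h]

-- cell-level characterisations of the two first phases
theorem lastMatch_none_of_rowne (ws : List (Nat × Nat × Int)) (r c : Nat)
    (h : ∀ w ∈ ws, w.1 ≠ r) : lastMatch ws r c = none := by
  rw [lastMatch, pvOW_eq_getLast?_filterMap]
  have : ws.filterMap (fun w => if w.1 = r ∧ w.2.1 = c then some w.2.2 else none) = [] := by
    rw [List.filterMap_eq_nil_iff]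
    intro w hw
    rw [if_neg (fun hh => h w hw hh.1)]
  simp [this]

theorem get2_phase1A (g : List (List Int)) (bg : Int) (W : Nat) (hRect : RectGE g W)
    (r c : Nat) (hr : r < g.length) (hc : c < W) :
    get2 ((pixelsOf g bg g.length W).foldl (pvTrailA g.length) g) r c = val1 g bg r c := by
  rw [phase1A_rep]
  have hin : ∀ w ∈ (pixelsOf g bg g.length W).flatMap (writesA g.length),
      w.1 < g.length ∧ w.2.1 < (g.getD w.1 []).length := by
    intro w hw
    obtain ⟨p, hp, hw2⟩ := List.mem_flatMap.mp hw
    have h1 := writesA_mem _ p w hw2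
    have h2 := pixelsOf_mem g bg _ W p hp
    exact ⟨h1.1, lt_of_lt_of_le (h1.2 ▸ h2.2) (hRect w.1 h1.1)⟩
  rw [get2_applyWrites _ _ hin, lastMatch_A g bg _ W r c hr hc, val1]
  cases nearAbove g bg c r <;> simp


theorem get2_phase1A_high (g : List (List Int)) (bg : Int) (W : Nat)
    (r c : Nat) (hc : W ≤ c) :
    get2 ((pixelsOf g bg g.length W).foldl (pvTrailA g.length) g) r c = get2 g r c := by
  rw [phase1A_rep, applyWrites]
  have : ∀ (out : List (List Int)) (ws : List (Nat × Nat × Int)),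
      (∀ w ∈ ws, w.2.1 ≠ c) → get2 (ws.foldl (fun g w => set2 g w.1 w.2.1 w.2.2) out) r c = get2 out r c := by
    intro out ws h
    exact get2_applyWrites_colne out ws c h r
  apply this
  intro w hw
  obtain ⟨p, hp, hw2⟩ := List.mem_flatMap.mp hw
  have h1 := writesA_mem _ p w hw2
  have h2 := pixelsOf_mem g bg _ W p hp
  omega


theorem get2_colPass_other (g : List (List Int)) (bg : Int) (H : Nat)
    (out : List (List Int)) (c c' r : Nat) (h : c' ≠ c) :
    get2 (pvColPass g bg H out c) r c' = get2 out r c' := by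
  rw [colPass_rep]
  apply get2_applyWrites_colne
  intro w hw
  rw [(bWrites_mem g bg H c w hw).2]
  exact fun hh => h hh.symm


theorem get2_colPass_self (g : List (List Int)) (bg : Int) (W : Nat) (hRect : RectGE g W)
    (out : List (List Int)) (hsh : SameShape out g) (c r : Nat) (hc : c < W) :
    get2 (pvColPass g bg g.length out c) r c =
      if r < g.length then
        (match nearAbove g bg c r with | some x => tv r x | none => get2 out r c)
      else get2 out r c := by
  rw [colPass_rep]
  have hin : ∀ w ∈ bWrites g bg g.length c,
      w.1 < out.length ∧ w.2.1 < (out.getD w.1 []).length := by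
    intro w hw
    have h1 := bWrites_mem g bg g.length c w hw
    refine ⟨by rw [hsh.1]; exact h1.1, ?_⟩
    rw [hsh.2, h1.2]
    exact lt_of_lt_of_le hc (hRect w.1 h1.1)
  rw [get2_applyWrites _ _ hin]
  by_cases hr : r < g.length
  · rw [lastMatch_bWrites g bg g.length c r hr, if_pos hr]
    cases nearAbove g bg c r <;> simp
  · rw [lastMatch_none_of_rowne, if_neg hr]
    · simp
    · intro w hw
      have h1 := bWrites_mem g bg g.length c w hw
      omega


theorem foldCols_shape (g : List (List Int)) (bg : Int) (H : Nat) (cs : List Nat)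
    (out : List (List Int)) (hsh : SameShape out g) :
    SameShape (cs.foldl (pvColPass g bg H) out) g := by
  induction cs generalizing out with
  | nil => exact hsh
  | cons c0 cs ih =>
      rw [List.foldl_cons, colPass_rep]
      exact ih _ (sameShape_applyWrites _ _ _ hsh)

theorem foldCols_char (g : List (List Int)) (bg : Int) (W : Nat) (hRect : RectGE g W)
    (cs : List Nat) (hcs : ∀ x ∈ cs, x < W) (out : List (List Int)) (hsh : SameShape out g) :
    ∀ r c, get2 (cs.foldl (pvColPass g bg g.length) out) r c =
      if c ∈ cs ∧ r < g.length ∧ (nearAbove g bg c r).isSome then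
        (match nearAbove g bg c r with | some x => tv r x | none => get2 out r c)
      else get2 out r c := by
  induction cs generalizing out with
  | nil => intro r c; simp
  | cons c0 cs ih =>
      intro r c
      rw [List.foldl_cons]
      have hsh' : SameShape (pvColPass g bg g.length out c0) g := by
        rw [colPass_rep]; exact sameShape_applyWrites _ _ _ hsh
      rw [ih (fun x hx => hcs x (by simp [hx])) _ hsh' r c]
      by_cases hmem : c ∈ cs
      · by_cases hcond : r < g.length ∧ (nearAbove g bg c r).isSome
        · rw [if_pos ⟨hmem, hcond⟩, if_pos ⟨by simp [hmem], hcond⟩]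
          cases hna : nearAbove g bg c r with
          | none => rw [hna] at hcond; simp at hcond
          | some x => simp
        · rw [if_neg (by tauto), if_neg (by tauto)]
          by_cases hcc : c = c0
          · subst hcc
            rw [get2_colPass_self g bg W hRect out hsh c r (hcs c (by simp))]
            by_cases hr : r < g.length
            · rw [if_pos hr]
              cases hna : nearAbove g bg c r with
              | none => simp
              | some x => rw [hna] at hcond; simp [hr] at hcond
            · rw [if_neg hr]
          · rw [get2_colPass_other g bg g.length out c0 c r hcc]
      · by_cases hcc : c = c0
        · subst hcc
          rw [if_neg (by tauto)]
          rw [get2_colPass_self g bg W hRect out hsh c r (hcs c (by simp))]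
          by_cases hr : r < g.length
          · rw [if_pos hr]
            cases hna : nearAbove g bg c r with
            | none =>
                rw [if_neg (by simp [hna])]
            | some x =>
                rw [if_pos ⟨by simp, hr, by simp⟩]
          · have h2 : ¬ (c ∈ c :: cs ∧ r < g.length ∧ (nearAbove g bg c r).isSome) :=
              fun hh => hr hh.2.1
            rw [if_neg hr, if_neg h2]
        · have h1 : ¬ (c ∈ cs ∧ r < g.length ∧ (nearAbove g bg c r).isSome) := by tauto
          have h2 : ¬ (c ∈ c0 :: cs ∧ r < g.length ∧ (nearAbove g bg c r).isSome) := by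
            rintro ⟨hin, _⟩
            rcases List.mem_cons.mp hin with h | h
            · exact hcc h
            · exact hmem h
          rw [if_neg h1, if_neg h2]
          exact get2_colPass_other g bg g.length out c0 c r hcc


-- list-level equality of the two first phases
theorem get2_applyWrites_rowne (g : List (List Int)) (ws : List (Nat × Nat × Int)) (r : Nat)
    (h : ∀ w ∈ ws, w.1 ≠ r) (c : Nat) :
    get2 (applyWrites g ws) r c = get2 g r c := by
  induction ws generalizing g with
  | nil => rfl
  | cons w ws ih =>
      rw [applyWrites_cons, ih _ (fun x hx => h x (by simp [hx])), get2_set2]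
      have : ¬ (r = w.1 ∧ c = w.2.1 ∧ w.1 < g.length ∧ w.2.1 < (g.getD w.1 []).length) := by
        intro ⟨a1, _⟩; exact h w (by simp) a1.symm
      simp only [this, if_false]
theorem phase1_eq (g : List (List Int)) (bg : Int) (W : Nat) (hRect : RectGE g W) :
    (pixelsOf g bg g.length W).foldl (pvTrailA g.length) g =
      (List.range W).foldl (pvColPass g bg g.length) g := by
  have hshg : SameShape g g := ⟨rfl, fun _ => rfl⟩
  have hshA : SameShape ((pixelsOf g bg g.length W).foldl (pvTrailA g.length) g) g := by
    rw [phase1A_rep]; exact sameShape_applyWrites _ _ _ hshg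
  have hshB : SameShape ((List.range W).foldl (pvColPass g bg g.length) g) g :=
    foldCols_shape g bg g.length (List.range W) g hshg
  have hget : ∀ r c, get2 ((pixelsOf g bg g.length W).foldl (pvTrailA g.length) g) r c =
      get2 ((List.range W).foldl (pvColPass g bg g.length) g) r c := by
    intro r c
    rw [foldCols_char g bg W hRect (List.range W) (fun x hx => List.mem_range.mp hx) g hshg r c]
    by_cases hc : c < W
    · by_cases hr : r < g.length
      · rw [get2_phase1A g bg W hRect r c hr hc, val1]
        cases hna : nearAbove g bg c r with
        | none => rw [if_neg (by simp [hna])]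
        | some x => rw [if_pos ⟨List.mem_range.mpr hc, hr, by simp [hna]⟩]
      · -- r out of range: A side writes rows < H only
        have hA : get2 ((pixelsOf g bg g.length W).foldl (pvTrailA g.length) g) r c = get2 g r c := by
          rw [phase1A_rep]
          apply get2_applyWrites_rowne
          intro w hw
          obtain ⟨p, hp, hw2⟩ := List.mem_flatMap.mp hw
          have h1 := writesA_mem _ p w hw2
          omega
        rw [hA, if_neg (fun hh => hr hh.2.1)]
    · rw [get2_phase1A_high g bg W r c (Nat.le_of_not_lt hc),
        if_neg (fun hh => hc (List.mem_range.mp hh.1))]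
  -- lift get2 equality to list equality
  apply List.ext_getElem?
  intro i
  set A := (pixelsOf g bg g.length W).foldl (pvTrailA g.length) g with hA
  set B := (List.range W).foldl (pvColPass g bg g.length) g with hB
  by_cases hi : i < g.length
  · have hiA : i < A.length := by rw [hshA.1]; exact hi
    have hiB : i < B.length := by rw [hshB.1]; exact hi
    rw [List.getElem?_eq_getElem hiA, List.getElem?_eq_getElem hiB]
    congr 1
    apply List.ext_getElem?
    intro j
    have hrowA : A[i] = A.getD i [] := (List.getD_eq_getElem A [] hiA).symm
    have hrowB : B[i] = B.getD i [] := (List.getD_eq_getElem B [] hiB).symm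
    by_cases hj : j < (g.getD i []).length
    · have hjA : j < A[i].length := by rw [hrowA, hshA.2]; exact hj
      have hjB : j < B[i].length := by rw [hrowB, hshB.2]; exact hj
      rw [List.getElem?_eq_getElem hjA, List.getElem?_eq_getElem hjB]
      have e1 : A[i][j] = get2 A i j := by
        rw [get2, ← hrowA, List.getD_eq_getElem _ _ hjA]
      have e2 : B[i][j] = get2 B i j := by
        rw [get2, ← hrowB, List.getD_eq_getElem _ _ hjB]
      rw [e1, e2, hget i j]
    · have hjA : ¬ j < A[i].length := by rw [hrowA, hshA.2]; exact hj
      have hjB : ¬ j < B[i].length := by rw [hrowB, hshB.2]; exact hj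
      rw [List.getElem?_eq_none (Nat.le_of_not_lt hjA), List.getElem?_eq_none (Nat.le_of_not_lt hjB)]
  · have hiA : ¬ i < A.length := by rw [hshA.1]; exact hi
    have hiB : ¬ i < B.length := by rw [hshB.1]; exact hi
    rw [List.getElem?_eq_none (Nat.le_of_not_lt hiA), List.getElem?_eq_none (Nat.le_of_not_lt hiB)]


-- pvDownTo0 facts
theorem downTo0_le (n : Nat) : ∀ x ∈ pvDownTo0 n, x ≤ n := by
  induction n using Nat.strong_induction_on with
  | _ n ih =>
      intro x hx
      rw [pvDownTo0] at hx
      rcases List.mem_cons.mp hx with rfl | hx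
      · exact Nat.le_refl x
      · by_cases h2 : 2 ≤ n
        · rw [dif_pos h2] at hx
          have := ih (n - 2) (by omega) x hx
          omega
        · rw [dif_neg h2] at hx
          simp at hx

theorem downTo0_pairwise (n : Nat) : (pvDownTo0 n).Pairwise (· ≠ ·) := by
  induction n using Nat.strong_induction_on with
  | _ n ih =>
      rw [pvDownTo0]
      by_cases h2 : 2 ≤ n
      · rw [dif_pos h2]
        refine List.pairwise_cons.mpr ⟨?_, ih (n - 2) (by omega)⟩
        intro x hx
        have := downTo0_le (n - 2) x hx
        omega
      · rw [dif_neg h2]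
        simp

-- the conditional inner loop of A equals the unconditional one of B on an all-bg column
theorem inner_eq (bg : Int) (d : Nat) (l : List Nat) (hnd : l.Pairwise (· ≠ ·)) :
    ∀ (out : List (List Int)), (∀ rr ∈ l, get2 out rr d = bg) →
    l.foldl (fun out r => if get2 out r d = bg then set2 out r d 6 else out) out =
      l.foldl (fun out r => set2 out r d 6) out := by
  induction l with
  | nil => intro out _; rfl
  | cons r1 l ih =>
      intro out hall
      rw [List.foldl_cons, List.foldl_cons, if_pos (hall r1 (by simp))]
      apply ih (List.pairwise_cons.mp hnd).2
      intro rr hrr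
      rw [get2_set2]
      have hne : r1 ≠ rr := (List.pairwise_cons.mp hnd).1 rr hrr
      rw [if_neg (by rintro ⟨a1, _⟩; exact hne a1.symm)]
      exact hall rr (by simp [hrr])

theorem innerB_rep (d : Nat) (m : Nat) (out : List (List Int)) :
    (pvDownTo0 m).foldl (fun out r => set2 out r d 6) out =
      applyWrites out ((pvDownTo0 m).map (fun r => (r, d, (6 : Int)))) := by
  rw [applyWrites, List.foldl_map]

-- the two phase-2 folds agree
theorem phase2_fold_eq (g : List (List Int)) (bg : Int) (m : Nat) (qs : List Nat)
    (hnd : qs.Pairwise (· ≠ ·)) :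
    ∀ (P : List (List Int)), (∀ q ∈ qs, ∀ rr ∈ pvDownTo0 m, get2 P rr (q + 1) = bg) →
    qs.foldl (fun out c0 => (pvDownTo0 m).foldl
        (fun out r => if get2 out r (c0 + 1) = bg then set2 out r (c0 + 1) 6 else out) out) P =
      qs.foldl (fun out c0 => (pvDownTo0 m).foldl (fun out r => set2 out r (c0 + 1) 6) out) P := by
  induction qs with
  | nil => intro P _; rfl
  | cons q qs ih =>
      intro P hq
      rw [List.foldl_cons, List.foldl_cons,
        inner_eq bg (q + 1) (pvDownTo0 m) (downTo0_pairwise m) P (hq q (by simp))]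
      apply ih (List.pairwise_cons.mp hnd).2
      intro q' hq' rr hrr
      rw [innerB_rep, get2_applyWrites_colne]
      · exact hq q' (by simp [hq']) rr hrr
      · intro w hw
        obtain ⟨x, hx, rfl⟩ := List.mem_map.mp hw
        have : q ≠ q' := (List.pairwise_cons.mp hnd).1 q' hq'
        simp
        omega

theorem upA_eq (bg : Int) (pcols : PySem.Set Nat) (H W : Nat) (out : List (List Int))
    (p : Nat × Nat × Int) :
    pvUpTrailA bg pcols H W out p =
      if p.1 + 2 = H ∧ ((1 ≤ p.2.1 ∧ ¬ (PySem.Set.contains pcols (p.2.1 - 1) = true)) ∧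
          (p.2.1 + 1 < W ∧ ¬ (PySem.Set.contains pcols (p.2.1 + 1) = true))) then
        (pvDownTo0 p.1).foldl
          (fun out r => if get2 out r (p.2.1 + 1) = bg then set2 out r (p.2.1 + 1) 6 else out) out
      else out := by
  rw [pvUpTrailA]
  by_cases h1 : p.1 + 2 = H
  · by_cases h2 : (1 ≤ p.2.1 ∧ ¬ (PySem.Set.contains pcols (p.2.1 - 1) = true)) ∧
        (p.2.1 + 1 < W ∧ ¬ (PySem.Set.contains pcols (p.2.1 + 1) = true))
    · rw [if_pos h1, if_pos h2, if_pos ⟨h1, h2⟩]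
    · rw [if_pos h1, if_neg h2, if_neg (by tauto)]
  · rw [if_neg h1, if_neg (by tauto)]

theorem pixelsFilter (g : List (List Int)) (bg : Int) (H W : Nat)
    (C : Nat → Prop) [DecidablePred C] (hH : 2 ≤ H) :
    (pixelsOf g bg H W).filter (fun p => decide (p.1 + 2 = H ∧ C p.2.1)) =
      ((pixRow g bg W (H - 2)).filter (fun c0 => decide (C c0))).map
        (fun c0 => (H - 2, c0, get2 g (H - 2) c0)) := by
  rw [pixelsOf, List.filter_flatMap]
  have hrow : ∀ r0, ((pixRow g bg W r0).map (fun c0 => (r0, c0, get2 g r0 c0))).filter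
      (fun p => decide (p.1 + 2 = H ∧ C p.2.1)) =
      if r0 = H - 2 then
        ((pixRow g bg W (H - 2)).filter (fun c0 => decide (C c0))).map
          (fun c0 => (H - 2, c0, get2 g (H - 2) c0))
      else [] := by
    intro r0
    rw [List.filter_map]
    by_cases hr0 : r0 = H - 2
    · subst hr0
      rw [if_pos rfl]
      congr 1
      apply List.filter_congr
      intro c0 _
      simp only [Function.comp]
      have h2 : H - 2 + 2 = H := by omega
      simp [h2]
    · rw [if_neg hr0]
      have : (pixRow g bg W r0).filter
          ((fun p : Nat × Nat × Int => decide (p.1 + 2 = H ∧ C p.2.1)) ∘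
            (fun c0 => (r0, c0, get2 g r0 c0))) = [] := by
        rw [List.filter_eq_nil_iff]
        intro c0 _
        simp only [Function.comp]
        simp
        intro habs
        omega
      rw [this, List.map_nil]
  rw [List.flatMap_congr (fun r0 _ => hrow r0), List.range_eq_range', flatMap_range'_single]
  rw [if_pos (by omega)]

theorem pixelsFilter_nil (g : List (List Int)) (bg : Int) (H W : Nat)
    (C : Nat → Prop) [DecidablePred C] (hH : H < 2) :
    (pixelsOf g bg H W).filter (fun p => decide (p.1 + 2 = H ∧ C p.2.1)) = [] := by
  rw [List.filter_eq_nil_iff]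
  intro p _
  simp
  intro habs
  omega

theorem nearAbove_none_of_allbg (g : List (List Int)) (bg : Int) (d r : Nat)
    (h : ∀ r0, r0 < r → get2 g r0 d = bg) : nearAbove g bg d r = none := by
  rw [nearAbove]
  have : (List.range r).filterMap
      (fun pr => if get2 g pr d ≠ bg then some (pr, get2 g pr d) else none) = [] := by
    rw [List.filterMap_eq_nil_iff]
    intro pr hpr
    rw [if_neg (by simpa using h pr (List.mem_range.mp hpr))]
  rw [this]
  rfl

theorem contains_pcols_iff (g : List (List Int)) (bg : Int) (H W d : Nat) :
    (PySem.Set.contains (PySem.Set.ofList ((List.range H).flatMap (pixRow g bg W))) d = true) ↔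
      ∃ r0, r0 < H ∧ d < W ∧ get2 g r0 d ≠ bg := by
  simp [PySem.Set.contains, PySem.Set.mem_ofList, List.mem_flatMap, pixRow,
    List.mem_filter, List.mem_range]

theorem colfree_entry_iff (g : List (List Int)) (bg : Int) (H W d : Nat) (hd : d < W) :
    (((List.range W).map (fun c => (List.range H).all (fun r => get2 g r c == bg))).getD d false = true)
      ↔ ∀ r0, r0 < H → get2 g r0 d = bg := by
  rw [PySem.List.getD_map_range _ _ _ _ hd]
  simp [List.all_eq_true, List.mem_range]

-- ===== VERDICT (by name: the statement is the Claim_ definition above) =====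
theorem transform_spec : Claim_equal_transform := by
  intro g hdom hpre
  unfold Spec_transform
  obtain ⟨hne, hflat, hrows⟩ := hpre
  have hRect : RectGE g ((g.headD []).length) := by
    intro i hi
    rw [List.getD_eq_getElem _ _ hi]
    exact hrows g[i] (List.getElem_mem hi)
  simp only [transform, transform_alt, scanPixels_spec]
  set W := (g.headD []).length with hW
  set H := g.length with hH
  set bg := pvMostCommon (g.flatMap (fun row => row)) with hbg
  set pcols := PySem.Set.ofList ((List.range H).flatMap (pixRow g bg W)) with hpcols
  rw [phase1_eq g bg W hRect]
  set Q := (List.range W).foldl (pvColPass g bg H) g with hQ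
  have hshQ : SameShape Q g := foldCols_shape g bg H (List.range W) g ⟨rfl, fun _ => rfl⟩
  -- collapse A's phase-2 loop to a fold over qualifying columns
  have hup : pvUpTrailA bg pcols H W = (fun out p =>
      if p.1 + 2 = H ∧ ((1 ≤ p.2.1 ∧ ¬ (PySem.Set.contains pcols (p.2.1 - 1) = true)) ∧
          (p.2.1 + 1 < W ∧ ¬ (PySem.Set.contains pcols (p.2.1 + 1) = true))) then
        (pvDownTo0 p.1).foldl
          (fun out r => if get2 out r (p.2.1 + 1) = bg then set2 out r (p.2.1 + 1) 6 else out) out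
      else out) := by
    funext out p
    exact upA_eq bg pcols H W out p
  rw [hup, PySem.List.foldl_ite_eq_foldl_filter
    (p := fun p : Nat × Nat × Int => p.1 + 2 = H ∧
      ((1 ≤ p.2.1 ∧ ¬ (PySem.Set.contains pcols (p.2.1 - 1) = true)) ∧
       (p.2.1 + 1 < W ∧ ¬ (PySem.Set.contains pcols (p.2.1 + 1) = true))))
    (f := fun out p => (pvDownTo0 p.1).foldl
      (fun out r => if get2 out r (p.2.1 + 1) = bg then set2 out r (p.2.1 + 1) 6 else out) out)]
  by_cases hH2 : 2 ≤ H
  · rw [pixelsFilter g bg H W (fun c0 => (1 ≤ c0 ∧ ¬ (PySem.Set.contains pcols (c0 - 1) = true)) ∧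
      (c0 + 1 < W ∧ ¬ (PySem.Set.contains pcols (c0 + 1) = true))) hH2, List.foldl_map, if_pos hH2]
    rw [PySem.List.foldl_ite_eq_foldl_filter
      (p := fun pc => get2 g (H - 2) pc ≠ bg ∧ 1 ≤ pc ∧ pc + 1 < W ∧
        ((List.range W).map (fun c => (List.range H).all (fun r => get2 g r c == bg))).getD (pc - 1) false = true ∧
        ((List.range W).map (fun c => (List.range H).all (fun r => get2 g r c == bg))).getD (pc + 1) false = true)
      (f := fun out pc => (pvDownTo0 (H - 2)).foldl (fun out r => set2 out r (pc + 1) 6) out)]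
    -- the two lists of qualifying columns coincide
    have hlists : (pixRow g bg W (H - 2)).filter (fun c0 => decide
        ((1 ≤ c0 ∧ ¬ (PySem.Set.contains pcols (c0 - 1) = true)) ∧
         (c0 + 1 < W ∧ ¬ (PySem.Set.contains pcols (c0 + 1) = true)))) =
        (List.range W).filter (fun pc => decide (get2 g (H - 2) pc ≠ bg ∧ 1 ≤ pc ∧ pc + 1 < W ∧
          ((List.range W).map (fun c => (List.range H).all (fun r => get2 g r c == bg))).getD (pc - 1) false = true ∧
          ((List.range W).map (fun c => (List.range H).all (fun r => get2 g r c == bg))).getD (pc + 1) false = true)) := by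
      rw [pixRow, List.filter_filter]
      apply List.filter_congr
      intro pc hpc
      have hpcW : pc < W := List.mem_range.mp hpc
      rw [Bool.and_comm, ← Bool.decide_and, decide_eq_decide]
      constructor
      · rintro ⟨hpix, ⟨h1, hcl⟩, ⟨h2, hcr⟩⟩
        refine ⟨hpix, h1, h2, ?_, ?_⟩
        · rw [colfree_entry_iff g bg H W _ (by omega)]
          intro r0 hr0
          by_contra hx
          exact hcl ((contains_pcols_iff g bg H W _).mpr ⟨r0, hr0, by omega, hx⟩)
        · rw [colfree_entry_iff g bg H W _ h2]
          intro r0 hr0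
          by_contra hx
          exact hcr ((contains_pcols_iff g bg H W _).mpr ⟨r0, hr0, h2, hx⟩)
      · rintro ⟨hpix, h1, h2, hcl, hcr⟩
        rw [colfree_entry_iff g bg H W _ (by omega)] at hcl
        rw [colfree_entry_iff g bg H W _ h2] at hcr
        refine ⟨hpix, ⟨h1, ?_⟩, ⟨h2, ?_⟩⟩
        · rw [contains_pcols_iff g bg H W]
          rintro ⟨r0, hr0, _, hx⟩
          exact hx (hcl r0 hr0)
        · rw [contains_pcols_iff g bg H W]
          rintro ⟨r0, hr0, _, hx⟩
          exact hx (hcr r0 hr0)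
    rw [hlists]
    -- now both sides fold over the same columns; drop A's per-cell check
    apply phase2_fold_eq g bg (H - 2)
    · exact (List.nodup_range.filter _)
    · -- every qualifying target column is all-background in Q
      intro q hq rr hrr
      have hmem := List.mem_filter.mp hq
      have hqW : q < W := List.mem_range.mp hmem.1
      have hcond := of_decide_eq_true hmem.2
      obtain ⟨hpix, h1, h2, hcl, hcr⟩ := hcond
      rw [colfree_entry_iff g bg H W _ h2] at hcr
      have hrr' : rr < H := by
        have := downTo0_le (H - 2) rr hrr
        omega
      have hnone : nearAbove g bg (q + 1) rr = none :=
        nearAbove_none_of_allbg g bg (q + 1) rr (fun r0 h0 => hcr r0 (by omega))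
      rw [hQ, foldCols_char g bg W hRect (List.range W) (fun x hx => List.mem_range.mp hx) g
        ⟨rfl, fun _ => rfl⟩ rr (q + 1)]
      rw [if_neg (by simp [hnone])]
      exact hcr rr hrr'
  · rw [pixelsFilter_nil g bg H W (fun c0 => (1 ≤ c0 ∧ ¬ (PySem.Set.contains pcols (c0 - 1) = true)) ∧
      (c0 + 1 < W ∧ ¬ (PySem.Set.contains pcols (c0 + 1) = true))) (by omega), if_neg hH2]
    rfl
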